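-- pv_equiv track=rewrite | github.com/Amir-hossein-Mazaheri/Healthcare_DataWarehouse | Source Data Generator/time_generator.py | get_persian_day_number_of_year
-- ===== SOURCE A (Python) =====
-- def get_persian_day_number_of_year(month: int, day: int):
--     number = day
--
--     for i in range(1, month):
--         if i <= 6:
--             number += 31
--         else:
--             number += 30
--
--     return number
-- ===== SOURCE B (Python) =====
-- def get_persian_day_number_of_year(month: int, day: int):
--     # closed form: 31 days for each preceding month, minus 1 for each month >= 7
--     return day + max(0, month - 1) * 31 - max(0, month - 7)
-- ===== Notes on version B (the rewrite author's own statement) =====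
-- stated objective: simpler
-- what changed: Replaced the per-month accumulation loop with a closed-form arithmetic expression (31 per preceding month minus one per month from the 7th on, clamped with max(0,...)).
import Mathlib
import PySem

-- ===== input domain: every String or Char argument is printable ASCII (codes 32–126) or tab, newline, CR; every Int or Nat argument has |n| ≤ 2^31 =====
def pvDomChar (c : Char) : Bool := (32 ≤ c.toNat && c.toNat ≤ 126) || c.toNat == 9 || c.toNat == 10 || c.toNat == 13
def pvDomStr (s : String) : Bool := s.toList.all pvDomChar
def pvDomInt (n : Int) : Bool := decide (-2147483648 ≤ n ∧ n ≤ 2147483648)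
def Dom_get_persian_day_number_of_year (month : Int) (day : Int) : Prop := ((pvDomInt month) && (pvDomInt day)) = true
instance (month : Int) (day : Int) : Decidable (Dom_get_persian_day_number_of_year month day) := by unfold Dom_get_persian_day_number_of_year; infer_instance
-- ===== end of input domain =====

-- ===== PORT A =====
-- B is the O(1) closed form of A's loop; ports are faithful transliterations.
def get_persian_day_number_of_year (month : Int) (day : Int) : Int :=
  (PySem.List.pyRange 1 month 1).foldl
    (fun number i => if i ≤ 6 then number + 31 else number + 30) day

-- ===== PORT B =====
def get_persian_day_number_of_year_alt (month : Int) (day : Int) : Int :=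
  day + max 0 (month - 1) * 31 - max 0 (month - 7)

-- ===== PRECONDITION & SPEC =====
def Spec_get_persian_day_number_of_year (month : Int) (day : Int) (out : Int) : Prop := out = get_persian_day_number_of_year_alt month day
instance (month : Int) (day : Int) (out : Int) : Decidable (Spec_get_persian_day_number_of_year month day out) := by unfold Spec_get_persian_day_number_of_year; infer_instance

-- ===== CLAIM (what is proved, stated in full; the proofs are below) =====
def Claim_equal_get_persian_day_number_of_year : Prop := ∀ (month : Int) (day : Int), Dom_get_persian_day_number_of_year month day → Spec_get_persian_day_number_of_year month day (get_persian_day_number_of_year month day)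

-- ===== LEMMAS AND PROOFS =====

-- ===== VERDICT (by name: the statement is the Claim_ definition above) =====
lemma pv_fold_closed (day : Int) (n : Nat) :
    (PySem.List.pyRange 1 (1 + n) 1).foldl
      (fun number i => if i ≤ 6 then number + 31 else number + 30) day
    = day + (n : Int) * 31 - max 0 ((n : Int) - 6) := by
  induction n with
  | zero => simp [PySem.List.pyRange_one_eq_nil]
  | succ k ih =>
    have h : (1 : Int) ≤ 1 + (k : Int) := by omega
    have : (1 : Int) + ((k : Nat) + 1 : Nat) = (1 + (k : Int)) + 1 := by push_cast; ring
    rw [this, PySem.List.pyRange_one_succ_right h, List.foldl_append, ih]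
    simp only [List.foldl_cons, List.foldl_nil]
    by_cases hk : (1 : Int) + k ≤ 6 <;> simp [hk] <;> omega

theorem get_persian_day_number_of_year_spec : Claim_equal_get_persian_day_number_of_year := by
  intro month day _
  unfold Spec_get_persian_day_number_of_year get_persian_day_number_of_year
    get_persian_day_number_of_year_alt
  by_cases h : month ≤ 1
  · rw [PySem.List.pyRange_one_eq_nil h]
    simp only [List.foldl_nil]
    omega
  · have hm : month = 1 + ((month - 1).toNat : Int) := by omega
    rw [hm, pv_fold_closed]
    omega
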